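-- pv_equiv track=rewrite | github.com/atakalive/gokrax | watchdog.py | _get_pending_reviewers
-- ===== SOURCE A (Python) =====
-- def _get_pending_reviewers(batch: list, review_key: str, reviewers: list, excluded=None) -> list:
--     """全Issueのレビューを完了していないレビュアーのリストを返す。
--
--     Args:
--         excluded: 除外するレビュアーのリスト（例: レート制限で応答不能になった者）
--     """
--     excluded_set = set(excluded or [])
--     pending = []
--     for reviewer in reviewers:
--         if reviewer in excluded_set:
--             continue
--         # 全Issueにこのレビュアーのレビューがあるか
--         if not all(reviewer in i.get(review_key, {}) for i in batch):
--             pending.append(reviewer)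
--     return pending
-- ===== SOURCE B (Python) =====
-- def _get_pending_reviewers(batch: list, review_key: str, reviewers: list, excluded=None) -> list:
--     """Aggregate-then-filter: count, per reviewer, the issues already reviewed, then keep the short ones."""
--     counts = {}
--     for i in batch:
--         for r in i.get(review_key, {}):
--             counts[r] = counts.get(r, 0) + 1
--     excluded_set = set(excluded or [])
--     n = len(batch)
--     return [r for r in reviewers if r not in excluded_set and counts.get(r, 0) < n]
-- ===== Notes on version B (the rewrite author's own statement) =====
-- stated objective: alternative
-- what changed: Replaces the per-reviewer all()-scan over the batch with a single aggregation pass building a reviewer->count table over the batch, followed by one filter over reviewers comparing counts to len(batch).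
import Mathlib
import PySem

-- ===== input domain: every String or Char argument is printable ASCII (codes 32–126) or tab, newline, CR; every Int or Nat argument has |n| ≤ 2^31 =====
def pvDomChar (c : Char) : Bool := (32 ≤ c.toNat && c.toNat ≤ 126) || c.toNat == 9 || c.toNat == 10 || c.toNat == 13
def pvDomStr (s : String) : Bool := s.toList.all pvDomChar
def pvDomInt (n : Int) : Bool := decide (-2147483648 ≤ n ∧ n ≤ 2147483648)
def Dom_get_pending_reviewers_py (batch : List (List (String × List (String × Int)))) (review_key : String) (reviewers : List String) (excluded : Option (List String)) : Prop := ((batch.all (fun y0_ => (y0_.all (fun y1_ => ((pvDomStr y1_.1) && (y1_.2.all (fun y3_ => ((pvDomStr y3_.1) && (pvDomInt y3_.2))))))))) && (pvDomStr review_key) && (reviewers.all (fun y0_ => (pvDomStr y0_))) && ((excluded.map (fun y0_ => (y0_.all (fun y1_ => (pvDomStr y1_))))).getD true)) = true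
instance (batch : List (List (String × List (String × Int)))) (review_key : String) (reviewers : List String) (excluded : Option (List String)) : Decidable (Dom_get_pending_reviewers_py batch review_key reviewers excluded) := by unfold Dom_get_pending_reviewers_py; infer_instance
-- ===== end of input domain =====

-- B replaces A's per-reviewer scan over all issues with one aggregation pass building a
-- reviewer→count table over the batch, then a single filter over reviewers (objective: alternative).

-- ===== PORT A =====
-- A: for each reviewer not excluded, append it unless every issue's review dict contains it.
def get_pending_reviewers_py (batch : List (List (String × List (String × Int)))) (review_key : String) (reviewers : List String) (excluded : Option (List String)) : List String :=
  let excluded_set := PySem.Set.ofList (excluded.getD [])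
  reviewers.foldl (fun pending reviewer =>
    if PySem.Set.contains excluded_set reviewer then pending
    else if !(batch.all (fun i =>
        PySem.Dict.contains (PySem.Dict.mk ((PySem.Dict.mk i).getD review_key [])) reviewer)) then
      pending ++ [reviewer]
    else pending) []

-- ===== PORT B =====
-- B: one pass over the batch builds counts[r] = number of issues whose review dict has key r
-- (a Python dict's keys are distinct, hence Set.ofList over the key list), then filter reviewers.
def get_pending_reviewers_py_alt (batch : List (List (String × List (String × Int)))) (review_key : String) (reviewers : List String) (excluded : Option (List String)) : List String :=
  let counts : PySem.Dict String Int := batch.foldl (fun d i =>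
      (PySem.Set.ofList (((PySem.Dict.mk i).getD review_key []).map Prod.fst)).foldl
        (fun d r => d.modify r 0 (· + 1)) d) PySem.Dict.empty
  let excluded_set := PySem.Set.ofList (excluded.getD [])
  let n : Int := batch.length
  reviewers.filter (fun r =>
    !(PySem.Set.contains excluded_set r) && decide (counts.getD r 0 < n))

-- ===== PRECONDITION & SPEC =====
def Spec_get_pending_reviewers_py (batch : List (List (String × List (String × Int)))) (review_key : String) (reviewers : List String) (excluded : Option (List String)) (out : List String) : Prop := out = get_pending_reviewers_py_alt batch review_key reviewers excluded
instance (batch : List (List (String × List (String × Int)))) (review_key : String) (reviewers : List String) (excluded : Option (List String)) (out : List String) : Decidable (Spec_get_pending_reviewers_py batch review_key reviewers excluded out) := by unfold Spec_get_pending_reviewers_py; infer_instance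

-- ===== CLAIM (what is proved, stated in full; the proofs are below) =====
def Claim_equal_get_pending_reviewers_py : Prop := ∀ (batch : List (List (String × List (String × Int)))) (review_key : String) (reviewers : List String) (excluded : Option (List String)), Dom_get_pending_reviewers_py batch review_key reviewers excluded → Spec_get_pending_reviewers_py batch review_key reviewers excluded (get_pending_reviewers_py batch review_key reviewers excluded)

-- ===== LEMMAS AND PROOFS =====

-- the key list of issue i's review dict, as B dedups it
def pvKeys (review_key : String) (i : List (String × List (String × Int))) : List String :=
  PySem.Set.ofList (((PySem.Dict.mk i).getD review_key []).map Prod.fst)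

-- B's counter gives, for each reviewer, the number of issues whose review dict contains it
theorem pv_counts_getD (batch : List (List (String × List (String × Int)))) (review_key : String)
    (d : PySem.Dict String Int) (r : String) :
    (batch.foldl (fun d i => (pvKeys review_key i).foldl (fun d r => d.modify r 0 (· + 1)) d) d).getD r 0
      = d.getD r 0 + ((batch.countP (fun i => decide (r ∈ pvKeys review_key i))) : Int) := by
  induction batch generalizing d with
  | nil => simp
  | cons i rest ih =>
      rw [List.foldl_cons, ih, PySem.Dict.getD_foldl_modify_add_one, List.countP_cons]
      have hnd : (pvKeys review_key i).Nodup := PySem.Set.nodup_ofList _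
      by_cases h : r ∈ pvKeys review_key i
      · rw [List.count_eq_one_of_mem hnd h]
        simp [h]; ring
      · rw [List.count_eq_zero_of_not_mem h]
        simp [h]

-- membership in the review dict, as A tests it, equals membership in pvKeys
theorem pv_contains_iff (review_key : String) (i : List (String × List (String × Int))) (r : String) :
    PySem.Dict.contains (PySem.Dict.mk ((PySem.Dict.mk i).getD review_key [])) r
      = decide (r ∈ pvKeys review_key i) := by
  simp [pvKeys, PySem.Dict.contains_mk, List.any_eq]

-- the two per-reviewer tests agree: "not all issues contain r" ↔ "count < len(batch)"
theorem pv_pred_eq (batch : List (List (String × List (String × Int)))) (review_key : String) (r : String) :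
    (!(batch.all (fun i => PySem.Dict.contains (PySem.Dict.mk ((PySem.Dict.mk i).getD review_key [])) r)))
      = decide (((batch.foldl (fun d i => (pvKeys review_key i).foldl (fun d r => d.modify r 0 (· + 1)) d) PySem.Dict.empty).getD r 0) < (batch.length : Int)) := by
  rw [pv_counts_getD]
  simp only [PySem.Dict.getD_empty, zero_add]
  have hle : batch.countP (fun i => decide (r ∈ pvKeys review_key i)) ≤ batch.length :=
    List.countP_le_length
  have hiff : (batch.countP (fun i => decide (r ∈ pvKeys review_key i)) : Int) < (batch.length : Int)
      ↔ ¬ (∀ i ∈ batch, r ∈ pvKeys review_key i) := by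
    rw [Int.ofNat_lt]
    constructor
    · intro hlt hall
      have := (List.countP_eq_length (p := fun i => decide (r ∈ pvKeys review_key i)) (l := batch)).mpr
        (by intro i hi; exact decide_eq_true (hall i hi))
      omega
    · intro hnall
      rcases Nat.lt_or_ge (batch.countP (fun i => decide (r ∈ pvKeys review_key i))) batch.length with h | h
      · exact h
      · exfalso; apply hnall
        intro i hi
        have := (List.countP_eq_length (p := fun i => decide (r ∈ pvKeys review_key i)) (l := batch)).mp
          (Nat.le_antisymm hle h)
        exact of_decide_eq_true (this i hi)
  simp only [pv_contains_iff]
  by_cases hall : ∀ i ∈ batch, r ∈ pvKeys review_key i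
  · have h1 : batch.all (fun i => decide (r ∈ pvKeys review_key i)) = true := by
      simp only [List.all_eq_true, decide_eq_true_eq]; exact hall
    rw [h1]
    simp only [Bool.not_true]
    symm; rw [decide_eq_false_iff_not]
    exact fun h => hiff.mp h hall
  · have h1 : batch.all (fun i => decide (r ∈ pvKeys review_key i)) = false := by
      rw [Bool.eq_false_iff]
      intro hc
      exact hall (fun i hi => of_decide_eq_true (List.all_eq_true.mp hc i hi))
    rw [h1]
    simp only [Bool.not_false]
    symm; exact decide_eq_true (hiff.mpr hall)

-- ===== VERDICT (by name: the statement is the Claim_ definition above) =====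
theorem get_pending_reviewers_py_spec : Claim_equal_get_pending_reviewers_py := by
  intro batch review_key reviewers excluded _
  unfold Spec_get_pending_reviewers_py get_pending_reviewers_py get_pending_reviewers_py_alt
  simp only
  rw [show (fun (pending : List String) reviewer =>
        if PySem.Set.contains (PySem.Set.ofList (excluded.getD [])) reviewer then pending
        else if !(batch.all (fun i =>
            PySem.Dict.contains (PySem.Dict.mk ((PySem.Dict.mk i).getD review_key [])) reviewer)) then
          pending ++ [reviewer]
        else pending)
      = (fun pending r =>
        if (!(PySem.Set.contains (PySem.Set.ofList (excluded.getD [])) r)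
            && !(batch.all (fun i =>
              PySem.Dict.contains (PySem.Dict.mk ((PySem.Dict.mk i).getD review_key [])) r)))
        then pending ++ [r] else pending) from by
      funext pending r
      cases h : PySem.Set.contains (PySem.Set.ofList (excluded.getD [])) r <;> simp only [Bool.not_true, Bool.not_false, Bool.true_and, Bool.false_and, Bool.false_eq_true, if_false, if_true]]
  rw [PySem.List.foldl_append_if_eq_filter]
  simp only [List.nil_append]
  apply List.filter_congr
  intro r _
  rw [pv_pred_eq batch review_key r]
  rfl
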